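-- pv_equiv track=rewrite | github.com/FanzCEO/FANZ-Unified-Ecosystem | services/CreatorCRM/services/google_contacts.py | merge_client_notes
-- ===== SOURCE A (Python) =====
-- def merge_client_notes(existing_notes: str, new_notes: str) -> str:
--     """
--     Merge client notes without duplicating content
--     """
--     if not existing_notes:
--         return new_notes or ""
--
--     if not new_notes:
--         return existing_notes
--
--     # Simple deduplication - split by lines and combine unique ones
--     existing_lines = set(line.strip() for line in existing_notes.split('\n') if line.strip())
--     new_lines = set(line.strip() for line in new_notes.split('\n') if line.strip())
--
--     all_lines = existing_lines.union(new_lines)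
--     return '\n'.join(sorted(all_lines))
-- ===== SOURCE B (Python) =====
-- def merge_client_notes(existing_notes: str, new_notes: str) -> str:
--     if not existing_notes:
--         return new_notes or ""
--     if not new_notes:
--         return existing_notes
--     lines = sorted(l for l in map(str.strip, existing_notes.split('\n') + new_notes.split('\n')) if l)
--     out = []
--     prev = None
--     for l in lines:
--         if l != prev:
--             out.append(l)
--             prev = l
--     return '\n'.join(out)
-- ===== Notes on version B (the rewrite author's own statement) =====
-- stated objective: alternative
-- what changed: B replaces the two per-string hash-set builds plus set.union with one sort of the combined stripped non-empty lines followed by an adjacency-dedup scan with a 'previous kept line' variable.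
import Mathlib
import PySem

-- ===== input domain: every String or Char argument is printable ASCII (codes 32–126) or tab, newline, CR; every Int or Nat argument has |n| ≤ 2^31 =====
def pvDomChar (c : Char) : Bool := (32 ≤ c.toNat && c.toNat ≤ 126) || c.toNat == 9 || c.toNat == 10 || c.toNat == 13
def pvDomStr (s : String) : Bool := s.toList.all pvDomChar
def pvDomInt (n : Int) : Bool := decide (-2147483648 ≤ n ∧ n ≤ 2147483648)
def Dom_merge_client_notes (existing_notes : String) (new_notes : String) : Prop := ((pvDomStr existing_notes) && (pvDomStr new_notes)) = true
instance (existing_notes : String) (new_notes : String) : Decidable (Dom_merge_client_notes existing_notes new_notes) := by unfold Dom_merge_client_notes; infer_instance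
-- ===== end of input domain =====

-- ===== PORT A =====
-- B merges both note strings' stripped lines into one sorted list and dedups by adjacency
-- instead of building two hash sets and sorting their union (objective: alternative).
def merge_client_notes (existing_notes : String) (new_notes : String) : String :=
  if existing_notes = "" then (if new_notes = "" then "" else new_notes)
  else if new_notes = "" then existing_notes
  else
    let existing_lines : PySem.Set String :=
      PySem.Set.ofList ((((PySem.Str.split? existing_notes "\n").getD []).map PySem.Str.strip).filter (fun l => l ≠ ""))
    let new_lines : PySem.Set String :=
      PySem.Set.ofList ((((PySem.Str.split? new_notes "\n").getD []).map PySem.Str.strip).filter (fun l => l ≠ ""))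
    let all_lines := PySem.Set.union existing_lines new_lines
    PySem.Str.join "\n" (PySem.List.sorted all_lines (fun x => x) false)

-- ===== PORT B =====
-- B's loop: 'for l in lines: if l != prev: out.append(l); prev = l'
def mcnLoop : List String → List String → Option String → List String
  | [], out, _ => out
  | l :: rest, out, prev =>
    if some l = prev then mcnLoop rest out prev
    else mcnLoop rest (out ++ [l]) (some l)

def merge_client_notes_alt (existing_notes : String) (new_notes : String) : String :=
  if existing_notes = "" then (if new_notes = "" then "" else new_notes)
  else if new_notes = "" then existing_notes
  else
    let lines := PySem.List.sorted
      ((((PySem.Str.split? existing_notes "\n").getD [] ++ (PySem.Str.split? new_notes "\n").getD []).map PySem.Str.strip).filter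
        (fun l => l ≠ "")) (fun x => x) false
    PySem.Str.join "\n" (mcnLoop lines [] none)

-- ===== PRECONDITION & SPEC =====
def Spec_merge_client_notes (existing_notes : String) (new_notes : String) (out : String) : Prop := out = merge_client_notes_alt existing_notes new_notes
instance (existing_notes : String) (new_notes : String) (out : String) : Decidable (Spec_merge_client_notes existing_notes new_notes out) := by unfold Spec_merge_client_notes; infer_instance

-- ===== CLAIM (what is proved, stated in full; the proofs are below) =====
def Claim_equal_merge_client_notes : Prop := ∀ (existing_notes : String) (new_notes : String), Dom_merge_client_notes existing_notes new_notes → Spec_merge_client_notes existing_notes new_notes (merge_client_notes existing_notes new_notes)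

-- ===== LEMMAS AND PROOFS =====

-- accumulator-free form of mcnLoop
def mcnRun : List String → Option String → List String
  | [], _ => []
  | l :: rest, prev =>
    if some l = prev then mcnRun rest prev
    else l :: mcnRun rest (some l)

theorem mcnLoop_eq_run (S : List String) (out : List String) (prev : Option String) :
    mcnLoop S out prev = out ++ mcnRun S prev := by
  induction S generalizing out prev with
  | nil => simp [mcnLoop, mcnRun]
  | cons l rest ih =>
    by_cases h : some l = prev <;> simp [mcnLoop, mcnRun, h, ih]

theorem mcnRun_spec (S : List String) (prev : Option String)
    (hs : S.Pairwise (· ≤ ·))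
    (hprev : ∀ p, prev = some p → ∀ y ∈ S, p ≤ y) :
    (mcnRun S prev).Pairwise (· < ·) ∧ (∀ x, x ∈ mcnRun S prev ↔ x ∈ S ∧ some x ≠ prev) := by
  induction S generalizing prev with
  | nil => simp [mcnRun]
  | cons l rest ih =>
    rcases List.pairwise_cons.mp hs with ⟨hall, htail⟩
    by_cases h : some l = prev
    · have hp : ∀ p, (prev : Option String) = some p → ∀ y ∈ rest, p ≤ y := by
        intro p hpeq y hy
        exact hprev p hpeq y (List.mem_cons_of_mem _ hy)
      obtain ⟨h1, h2⟩ := ih prev htail hp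
      refine ⟨by simpa [mcnRun, h] using h1, ?_⟩
      intro x
      simp only [mcnRun, h, if_true]
      rw [h2 x]
      constructor
      · rintro ⟨hx, hne⟩; exact ⟨List.mem_cons_of_mem _ hx, hne⟩
      · rintro ⟨hx, hne⟩
        rcases List.mem_cons.mp hx with rfl | hx
        · exact absurd h hne
        · exact ⟨hx, hne⟩
    · have hp : ∀ p, (some l : Option String) = some p → ∀ y ∈ rest, p ≤ y := by
        intro p hpeq y hy
        cases hpeq
        exact hall y hy
      obtain ⟨h1, h2⟩ := ih (some l) htail hp
      have hmem : ∀ x, x ∈ mcnRun rest (some l) → l < x := by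
        intro x hx
        obtain ⟨hxr, hxne⟩ := (h2 x).mp hx
        exact lt_of_le_of_ne (hall x hxr) (by simpa [eq_comm] using hxne)
      constructor
      · simp only [mcnRun, h, if_false]
        exact List.pairwise_cons.mpr ⟨hmem, h1⟩
      · intro x
        simp only [mcnRun, h, if_false, List.mem_cons]
        constructor
        · rintro (rfl | hx)
          · exact ⟨Or.inl rfl, h⟩
          · obtain ⟨hxr, hxne⟩ := (h2 x).mp hx
            refine ⟨Or.inr hxr, ?_⟩
            intro hxp
            rcases prev with _ | p
            · cases hxp
            · have hpl : p ≤ l := hprev p rfl l (List.mem_cons_self)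
              have hxl : l < x := hmem x hx
              have : p = x := by simpa using hxp.symm
              subst this
              exact absurd rfl (ne_of_gt (lt_of_le_of_lt hpl hxl))
        · rintro ⟨rfl | hx, hne⟩
          · exact Or.inl rfl
          · by_cases hxl : x = l
            · exact Or.inl hxl
            · exact Or.inr ((h2 x).mpr ⟨hx, by simpa using hxl⟩)

theorem merge_main (X Y : List String) :
    PySem.List.sorted (PySem.Set.union (PySem.Set.ofList X) (PySem.Set.ofList Y)) (fun x => x) false
      = mcnLoop (PySem.List.sorted (X ++ Y) (fun x => x) false) [] none := by
  set S := PySem.List.sorted (X ++ Y) (fun x => x) false with hS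
  have hsp : S.Pairwise (· ≤ ·) := by
    simpa using PySem.List.sorted_pairwise (X ++ Y) (fun x => x)
  obtain ⟨h1, h2⟩ := mcnRun_spec S none hsp (by simp)
  rw [mcnLoop_eq_run, List.nil_append]
  apply PySem.List.sorted_eq_of_perm_of_pairwise_lt
  · -- Perm: both Nodup with the same members
    apply (List.perm_ext_iff_of_nodup (h1.imp ne_of_lt) (PySem.Set.nodup_union _ _ (PySem.Set.nodup_ofList X))).mpr
    intro x
    rw [h2 x]
    simp [hS, PySem.List.mem_sorted, PySem.Set.mem_union, PySem.Set.mem_ofList]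
  · simpa using h1

-- ===== VERDICT (by name: the statement is the Claim_ definition above) =====
theorem merge_client_notes_spec : Claim_equal_merge_client_notes := by
  intro existing_notes new_notes _
  show merge_client_notes existing_notes new_notes = merge_client_notes_alt existing_notes new_notes
  unfold merge_client_notes merge_client_notes_alt
  by_cases he : existing_notes = ""
  · simp [he]
  · by_cases hn : new_notes = ""
    · simp [he, hn]
    · simp only [he, hn, if_false]
      rw [List.map_append, List.filter_append]
      exact congrArg (PySem.Str.join "\n") (merge_main _ _)
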